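-- pv_equiv track=rewrite | github.com/taylormitchell/ankify_roam | ankify_roam/roam/content.py | _get_emphasis_locs
-- ===== SOURCE A (Python) =====
-- def _get_emphasis_locs(string, emphasis):
--     emphasis_locs = []
--     emphasis_start = emphasis_end = None
--     for i,c in enumerate(string):
--         if emphasis_start is None and string[i:i+len(emphasis)] == emphasis:
--             emphasis_start = i
--             continue
--         if emphasis_end is None and string[i:i+len(emphasis)] == emphasis:
--             emphasis_end = i + (len(emphasis)-1)
--             emphasis_locs.append((emphasis_start, emphasis_end))
--             emphasis_start = emphasis_end = None
--
--     return emphasis_locs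
-- ===== SOURCE B (Python) =====
-- def _get_emphasis_locs(string, emphasis):
--     # Pass 1: index every marker occurrence (slice test keeps empty-emphasis behaviour).
--     L = len(emphasis)
--     positions = [i for i in range(len(string)) if string[i:i+L] == emphasis]
--     # Pass 2: pair consecutive occurrences; an unpaired trailing start is dropped.
--     it = iter(positions)
--     return [(s, e + L - 1) for s, e in zip(it, it)]
-- ===== Notes on version B (the rewrite author's own statement) =====
-- stated objective: simpler
-- what changed: Replaces the alternating start/end state-machine scan with two separate passes: first collect every index where the slice equals the marker (a comprehension), then pair consecutive occurrences via zip of one iterator with itself, which drops an unpaired trailing start automatically.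
import Mathlib
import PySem

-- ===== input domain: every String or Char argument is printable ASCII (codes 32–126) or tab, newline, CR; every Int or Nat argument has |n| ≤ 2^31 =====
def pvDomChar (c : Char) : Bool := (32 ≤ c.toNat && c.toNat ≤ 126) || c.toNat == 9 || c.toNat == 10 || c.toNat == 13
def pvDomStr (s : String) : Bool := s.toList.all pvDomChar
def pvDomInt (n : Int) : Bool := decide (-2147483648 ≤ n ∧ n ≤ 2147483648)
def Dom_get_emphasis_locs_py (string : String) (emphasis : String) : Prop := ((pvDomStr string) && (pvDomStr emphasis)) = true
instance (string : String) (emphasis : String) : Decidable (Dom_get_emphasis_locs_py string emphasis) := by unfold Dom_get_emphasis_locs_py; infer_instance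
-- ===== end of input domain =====

-- B: two clearly separated passes (index all marker occurrences, then pair them consecutively)
-- instead of A's alternating start/end state machine; same cost, plainer structure.


-- ===== PORT A =====
-- A's loop body: state = (emphasis_locs, emphasis_start, emphasis_end), p = (i, c) from enumerate.
def pvStepA (xs ys : List Char) (st : List (Int × Int) × Option Int × Option Int)
    (p : Int × Char) : List (Int × Int) × Option Int × Option Int :=
  if st.2.1 = none ∧ PySem.List.slice xs (some p.1) (some (p.1 + (ys.length : Int))) = ys then
    (st.1, some p.1, st.2.2)
  else if st.2.2 = none ∧ PySem.List.slice xs (some p.1) (some (p.1 + (ys.length : Int))) = ys then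
    -- emphasis_start is necessarily `some` here (otherwise the first branch would have fired)
    (st.1 ++ [(st.2.1.getD 0, p.1 + ((ys.length : Int) - 1))], none, none)
  else st

def get_emphasis_locs_py (string : String) (emphasis : String) : List (Int × Int) :=
  (List.foldl (pvStepA string.toList emphasis.toList)
    (([] : List (Int × Int)), (none : Option Int), (none : Option Int))
    (PySem.List.enumerate string.toList 0)).1

-- ===== PORT B =====
-- port of Source B's `[(s, e + L - 1) for s, e in zip(it, it)]` over the iterator of `positions`
def pvPairUp (L : Int) : List Int → List (Int × Int)
  | s :: e :: rest => (s, e + L - 1) :: pvPairUp L rest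
  | _ => []

def get_emphasis_locs_py_alt (string : String) (emphasis : String) : List (Int × Int) :=
  let L : Int := (emphasis.toList.length : Int)
  let positions : List Int :=
    (PySem.List.pyRange 0 (string.toList.length : Int) 1).filter
      (fun i => decide (PySem.List.slice string.toList (some i) (some (i + L)) = emphasis.toList))
  pvPairUp L positions

-- ===== PRECONDITION & SPEC =====
def Spec_get_emphasis_locs_py (string : String) (emphasis : String) (out : List (Int × Int)) : Prop := out = get_emphasis_locs_py_alt string emphasis
instance (string : String) (emphasis : String) (out : List (Int × Int)) : Decidable (Spec_get_emphasis_locs_py string emphasis out) := by unfold Spec_get_emphasis_locs_py; infer_instance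

-- ===== CLAIM (what is proved, stated in full; the proofs are below) =====
def Claim_equal_get_emphasis_locs_py : Prop := ∀ (string : String) (emphasis : String), Dom_get_emphasis_locs_py string emphasis → Spec_get_emphasis_locs_py string emphasis (get_emphasis_locs_py string emphasis)

-- ===== LEMMAS AND PROOFS =====

-- Invariant of A's scan: from a clean state it appends the consecutive pairing of the
-- matching indices of the remaining stream; with a pending start s, that start is paired first.
theorem pv_aux (xs ys : List Char) (ps : List (Int × Char)) :
    (∀ acc : List (Int × Int),
      (List.foldl (pvStepA xs ys) (acc, none, none) ps).1
        = acc ++ pvPairUp (ys.length : Int)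
            ((ps.map (·.1)).filter
              (fun i => decide (PySem.List.slice xs (some i) (some (i + (ys.length : Int))) = ys))))
    ∧ (∀ (acc : List (Int × Int)) (s : Int),
      (List.foldl (pvStepA xs ys) (acc, some s, none) ps).1
        = acc ++ pvPairUp (ys.length : Int)
            (s :: (ps.map (·.1)).filter
              (fun i => decide (PySem.List.slice xs (some i) (some (i + (ys.length : Int))) = ys)))) := by
  induction ps with
  | nil => simp [pvPairUp]
  | cons p rest ih =>
    obtain ⟨ih1, ih2⟩ := ih
    by_cases hm : PySem.List.slice xs (some p.1) (some (p.1 + (ys.length : Int))) = ys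
    · constructor
      · intro acc
        simp only [List.foldl_cons, pvStepA, hm, and_true, List.map_cons, List.filter_cons,
          decide_true, if_true]
        simpa using ih2 acc p.1
      · intro acc s
        have hne : (some s : Option Int) = none ↔ False := by simp
        simp only [List.foldl_cons, pvStepA, hm, and_true, List.map_cons, List.filter_cons,
          decide_true, hne, if_false, if_true, Option.getD_some]
        rw [ih1]
        have : p.1 + ((ys.length : Int) - 1) = p.1 + (ys.length : Int) - 1 := by ring
        simp [pvPairUp, this]
    · constructor
      · intro acc
        simp only [List.foldl_cons, pvStepA, hm, and_false, if_false, List.map_cons,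
          List.filter_cons, decide_false]
        exact ih1 acc
      · intro acc s
        simp only [List.foldl_cons, pvStepA, hm, and_false, if_false, List.map_cons,
          List.filter_cons, decide_false]
        exact ih2 acc s

-- ===== VERDICT (by name: the statement is the Claim_ definition above) =====
theorem get_emphasis_locs_py_spec : Claim_equal_get_emphasis_locs_py := by
  intro string emphasis _
  show get_emphasis_locs_py string emphasis = get_emphasis_locs_py_alt string emphasis
  unfold get_emphasis_locs_py get_emphasis_locs_py_alt
  rw [(pv_aux string.toList emphasis.toList (PySem.List.enumerate string.toList 0)).1 []]
  simp [PySem.List.map_fst_enumerate]
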